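-- pv_equiv track=rewrite | github.com/camiloramirezgo/Reusing-wastewater-in-agriculture-a-Nexus-assessment-in-the-NWSAS | swtrt.py | legend_generator
-- ===== SOURCE A (Python) =====
-- def legend_generator(values):
--     color_list = []
--     for value in values:
--         if value < 1:
--             color_list.append('1')
--         elif value < 5:
--             color_list.append('2')
--         elif value < 10:
--             color_list.append('3')
--         elif value < 20:
--             color_list.append('4')
--         else:
--             color_list.append('5')
--     return color_list
-- ===== SOURCE B (Python) =====
-- def legend_generator(values):
--     # Count how many of the bucket boundaries each value has reached and
--     # derive the label character arithmetically from that count.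
--     return [chr(ord('1') + sum(v >= t for t in (1, 5, 10, 20))) for v in values]
-- ===== Notes on version B (the rewrite author's own statement) =====
-- stated objective: alternative
-- what changed: Instead of branching to the first threshold the value is below (early-exit if/elif chain), B counts how many boundaries the value has reached (a sum of all four comparisons) and computes the label character arithmetically from that count with chr/ord.
import Mathlib
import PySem

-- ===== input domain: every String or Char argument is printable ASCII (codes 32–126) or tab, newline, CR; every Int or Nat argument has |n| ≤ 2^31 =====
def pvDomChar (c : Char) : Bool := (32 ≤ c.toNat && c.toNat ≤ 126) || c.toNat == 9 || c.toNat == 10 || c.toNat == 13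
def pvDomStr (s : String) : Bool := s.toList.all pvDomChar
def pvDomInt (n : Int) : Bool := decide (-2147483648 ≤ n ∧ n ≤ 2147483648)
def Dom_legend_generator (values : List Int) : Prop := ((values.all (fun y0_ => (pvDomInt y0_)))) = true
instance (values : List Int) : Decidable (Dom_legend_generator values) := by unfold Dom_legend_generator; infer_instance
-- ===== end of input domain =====

-- B replaces A's early-exit if/elif chain by counting the boundaries each value has
-- reached and deriving the label character arithmetically (alternative; same cost).

-- ===== PORT A =====
-- literal transliteration of A's loop with an accumulator list
def legend_generator (values : List Int) : List String :=
  values.foldl (fun color_list value =>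
    if value < 1 then color_list ++ ["1"]
    else if value < 5 then color_list ++ ["2"]
    else if value < 10 then color_list ++ ["3"]
    else if value < 20 then color_list ++ ["4"]
    else color_list ++ ["5"]) []

-- ===== PORT B =====
-- sum(v >= t for t in (1,5,10,20))  ≡  countP; chr(ord('1') + k) ≡ Char.ofNat
def legend_generator_alt (values : List Int) : List String :=
  values.map (fun v =>
    String.mk [Char.ofNat ('1'.toNat + ([1, 5, 10, 20] : List Int).countP (fun t => t ≤ v))])

-- ===== PRECONDITION & SPEC =====
def Spec_legend_generator (values : List Int) (out : List String) : Prop := out = legend_generator_alt values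
instance (values : List Int) (out : List String) : Decidable (Spec_legend_generator values out) := by unfold Spec_legend_generator; infer_instance

-- ===== CLAIM (what is proved, stated in full; the proofs are below) =====
def Claim_equal_legend_generator : Prop := ∀ (values : List Int), Dom_legend_generator values → Spec_legend_generator values (legend_generator values)

-- ===== LEMMAS AND PROOFS =====

-- the boundary count, by interval
theorem count_eq (v : Int) :
    ([1, 5, 10, 20] : List Int).countP (fun t => t ≤ v)
      = if v < 1 then 0 else if v < 5 then 1 else if v < 10 then 2
        else if v < 20 then 3 else 4 := by
  simp only [List.countP_cons, List.countP_nil, decide_eq_true_eq]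
  split_ifs <;> omega

-- per-element agreement of the two bucketings
theorem legend_elem (v : Int) :
    String.mk [Char.ofNat (49 + ([1, 5, 10, 20] : List Int).countP (fun t => t ≤ v))]
      = (if v < 1 then "1" else if v < 5 then "2" else if v < 10 then "3"
         else if v < 20 then "4" else "5") := by
  rw [count_eq]
  split_ifs <;> decide

theorem legend_foldl (values : List Int) (acc : List String) :
    values.foldl (fun color_list value =>
      if value < 1 then color_list ++ ["1"]
      else if value < 5 then color_list ++ ["2"]
      else if value < 10 then color_list ++ ["3"]
      else if value < 20 then color_list ++ ["4"]
      else color_list ++ ["5"]) acc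
    = acc ++ values.map (fun v =>
        String.mk [Char.ofNat ('1'.toNat + ([1, 5, 10, 20] : List Int).countP (fun t => t ≤ v))]) := by
  induction values generalizing acc with
  | nil => simp
  | cons v vs ih =>
    simp only [List.foldl_cons, List.map_cons]
    rw [ih]
    have h := legend_elem v
    split_ifs at h ⊢ <;> simp [h]

-- ===== VERDICT (by name: the statement is the Claim_ definition above) =====
theorem legend_generator_spec : Claim_equal_legend_generator := by
  intro values _
  unfold Spec_legend_generator legend_generator legend_generator_alt
  simpa using legend_foldl values []
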